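-- pv_equiv track=rewrite | github.com/coreyhsu1013/agent-mesh | src/orchestrator/codebase_guide.py | _truncate_section
-- ===== SOURCE A (Python) =====
-- def _truncate_section(section: str, max_bytes: int) -> str:
--     """Truncate a section to fit within max_bytes, cutting at line boundaries."""
--     lines = section.split("\n")
--     result: list[str] = []
--     size = 0
--     for line in lines:
--         line_bytes = len(line.encode()) + 1  # +1 for \n
--         if size + line_bytes > max_bytes - 30:  # reserve space for truncation note
--             break
--         result.append(line)
--         size += line_bytes
--     result.append("\n<!-- ... truncated to fit budget -->")
--     return "\n".join(result)
-- ===== SOURCE B (Python) =====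
-- def _truncate_section(section: str, max_bytes: int) -> str:
--     """Truncate a section to fit within max_bytes, cutting at line boundaries."""
--     kept = section.split("\n")
--     total = sum(len(l.encode()) + 1 for l in kept)  # +1 per line for \n
--     budget = max_bytes - 30  # reserve space for truncation note
--     while kept and total > budget:
--         total -= len(kept.pop().encode()) + 1
--     kept.append("\n<!-- ... truncated to fit budget -->")
--     return "\n".join(kept)
-- ===== Notes on version B (the rewrite author's own statement) =====
-- stated objective: alternative
-- what changed: A grows the kept prefix front-to-back, accumulating sizes and breaking on overflow; B starts from the full line list with its total byte size and pops trailing lines while the total exceeds the budget (shrink-from-end), which reaches the same maximal prefix because per-line costs are positive so prefix sums are strictly increasing.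
import Mathlib
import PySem

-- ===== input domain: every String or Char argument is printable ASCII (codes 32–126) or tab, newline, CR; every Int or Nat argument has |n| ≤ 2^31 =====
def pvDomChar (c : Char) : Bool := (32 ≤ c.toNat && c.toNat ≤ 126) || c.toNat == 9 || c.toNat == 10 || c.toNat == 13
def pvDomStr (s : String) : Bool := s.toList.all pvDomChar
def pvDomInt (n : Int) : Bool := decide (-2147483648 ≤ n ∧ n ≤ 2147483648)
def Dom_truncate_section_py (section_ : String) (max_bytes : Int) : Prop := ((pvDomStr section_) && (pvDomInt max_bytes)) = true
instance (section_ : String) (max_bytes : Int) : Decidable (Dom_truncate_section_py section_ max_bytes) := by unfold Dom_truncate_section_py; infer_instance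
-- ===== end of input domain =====

-- B shrinks from the end: starting from all lines and their total byte size, it pops trailing lines while over budget, instead of A's grow-from-front accumulate-and-break; objective: alternative (same cost).


-- ===== PORT A =====
-- len(line.encode()) is ported as PySem.Str.len: on Dom every character is a single-byte
-- (ASCII/tab/CR) code point, so the UTF-8 byte length equals the character count (exact on Dom).
def truncAcc : List String → Int → Int → List String → List String
  | [], _, _, result => result
  | line :: rest, size, budget, result =>
    let line_bytes : Int := (PySem.Str.len line : Int) + 1
    if size + line_bytes > budget then result
    else truncAcc rest (size + line_bytes) budget (result ++ [line])

def truncate_section_py (section_ : String) (max_bytes : Int) : String :=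
  let lines := (PySem.Str.split? section_ "\n").getD []  -- sep = "\n" ≠ "", so split? is some
  let result := truncAcc lines 0 (max_bytes - 30) []
  PySem.Str.join "\n" (result ++ ["\n<!-- ... truncated to fit budget -->"])

-- ===== PORT B =====
-- B's 'while kept and total > budget: total -= cost(kept.pop())' loop, transcribed as head
-- recursion over the REVERSED list (pop() removes the head of the reversal); the caller reverses back.
def shrinkRev : List String → Int → Int → List String
  | [], _, _ => []
  | l :: rest, total, budget =>
    if total > budget then shrinkRev rest (total - ((PySem.Str.len l : Int) + 1)) budget
    else l :: rest

def truncate_section_py_alt (section_ : String) (max_bytes : Int) : String :=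
  let lines := (PySem.Str.split? section_ "\n").getD []  -- sep = "\n" ≠ "", so split? is some
  let total := (lines.map (fun l => (PySem.Str.len l : Int) + 1)).sum
  let budget := max_bytes - 30
  let kept := (shrinkRev lines.reverse total budget).reverse
  PySem.Str.join "\n" (kept ++ ["\n<!-- ... truncated to fit budget -->"])

-- ===== PRECONDITION & SPEC =====
def Spec_truncate_section_py (section_ : String) (max_bytes : Int) (out : String) : Prop := out = truncate_section_py_alt section_ max_bytes
instance (section_ : String) (max_bytes : Int) (out : String) : Decidable (Spec_truncate_section_py section_ max_bytes out) := by unfold Spec_truncate_section_py; infer_instance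

-- ===== CLAIM (what is proved, stated in full; the proofs are below) =====
def Claim_equal_truncate_section_py : Prop := ∀ (section_ : String) (max_bytes : Int), Dom_truncate_section_py section_ max_bytes → Spec_truncate_section_py section_ max_bytes (truncate_section_py section_ max_bytes)

-- ===== LEMMAS AND PROOFS =====

-- per-line byte cost and prefix-sum table (proof-only abstractions)
def lineCost (l : String) : Int := (PySem.Str.len l : Int) + 1

def sumCost (lines : List String) : Int := (lines.map lineCost).sum

def prefixTotals : List String → Int → List Int
  | [], _ => []
  | line :: rest, running => (running + lineCost line) :: prefixTotals rest (running + lineCost line)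

def fitCount (lines : List String) (r budget : Int) : Nat :=
  ((prefixTotals lines r).filter (fun t => decide (t ≤ budget))).length

lemma lineCost_pos (l : String) : 0 < lineCost l := by
  simp only [lineCost, PySem.Str.len_eq]
  omega

lemma sumCost_nonneg : ∀ (xs : List String), 0 ≤ sumCost xs := by
  intro xs
  induction xs with
  | nil => simp [sumCost]
  | cons x xt ih =>
    have := lineCost_pos x
    have hc : sumCost (x :: xt) = lineCost x + sumCost xt := by simp [sumCost]
    omega

lemma sumCost_append (xs ys : List String) : sumCost (xs ++ ys) = sumCost xs + sumCost ys := by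
  simp [sumCost]

lemma prefixTotals_gt : ∀ (lines : List String) (r t : Int), t ∈ prefixTotals lines r → r < t := by
  intro lines
  induction lines with
  | nil => intro r t h; simp [prefixTotals] at h
  | cons l rest ih =>
    intro r t h
    have hpos := lineCost_pos l
    simp only [prefixTotals, List.mem_cons] at h
    rcases h with h | h
    · omega
    · have := ih _ _ h
      omega

lemma prefixTotals_le_last : ∀ (lines : List String) (r t : Int),
    t ∈ prefixTotals lines r → t ≤ r + sumCost lines := by
  intro lines
  induction lines with
  | nil => intro r t h; simp [prefixTotals] at h
  | cons l rest ih =>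
    intro r t h
    have hc : sumCost (l :: rest) = lineCost l + sumCost rest := by simp [sumCost]
    simp only [prefixTotals, List.mem_cons] at h
    rcases h with h | h
    · have := sumCost_nonneg rest
      omega
    · have := ih _ _ h
      omega

lemma prefixTotals_length : ∀ (lines : List String) (r : Int),
    (prefixTotals lines r).length = lines.length := by
  intro lines
  induction lines with
  | nil => intro r; simp [prefixTotals]
  | cons l rest ih => intro r; simp [prefixTotals, ih]

lemma fitCount_le_length (lines : List String) (r budget : Int) :
    fitCount lines r budget ≤ lines.length := by
  unfold fitCount
  calc ((prefixTotals lines r).filter _).length ≤ (prefixTotals lines r).length :=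
        List.length_filter_le _ _
    _ = lines.length := prefixTotals_length lines r

lemma fitCount_cons (l : String) (rest : List String) (r budget : Int) :
    fitCount (l :: rest) r budget
      = (if r + lineCost l ≤ budget then 1 else 0) + fitCount rest (r + lineCost l) budget := by
  unfold fitCount
  by_cases h : r + lineCost l ≤ budget <;> simp [prefixTotals, h, Nat.add_comm]

lemma fitCount_zero_of_over (l : String) (rest : List String) (r budget : Int)
    (h : budget < r + lineCost l) : fitCount (l :: rest) r budget = 0 := by
  rw [fitCount_cons, if_neg (by omega)]
  have hrest : (prefixTotals rest (r + lineCost l)).filter (fun t => decide (t ≤ budget)) = [] := by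
    rw [List.filter_eq_nil_iff]
    intro t ht
    have := prefixTotals_gt rest _ t ht
    simp only [decide_eq_true_eq]
    omega
  simp [fitCount, hrest]

-- A's loop: equals acc ++ the maximal fitting prefix
lemma loopA_eq : ∀ (lines : List String) (size budget : Int) (acc : List String),
    truncAcc lines size budget acc = acc ++ lines.take (fitCount lines size budget) := by
  intro lines
  induction lines with
  | nil => intro size budget acc; simp [truncAcc, fitCount, prefixTotals]
  | cons l rest ih =>
    intro size budget acc
    simp only [truncAcc]
    by_cases h : size + lineCost l > budget
    · rw [if_pos (show size + ((PySem.Str.len l : Int) + 1) > budget from h),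
        fitCount_zero_of_over l rest size budget (by omega)]
      simp
    · rw [if_neg (show ¬ size + ((PySem.Str.len l : Int) + 1) > budget from h), ih]
      have hk : fitCount (l :: rest) size budget
          = fitCount rest (size + lineCost l) budget + 1 := by
        rw [fitCount_cons, if_pos (by omega)]; omega
      rw [hk, List.take_succ_cons]
      show acc ++ [l] ++ rest.take (fitCount rest (size + lineCost l) budget) = _
      simp

lemma prefixTotals_append (xs ys : List String) (r : Int) :
    prefixTotals (xs ++ ys) r = prefixTotals xs r ++ prefixTotals ys (r + sumCost xs) := by
  induction xs generalizing r with
  | nil => simp [prefixTotals, sumCost]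
  | cons x xt ih =>
    simp only [List.cons_append, prefixTotals, ih]
    have : r + lineCost x + sumCost xt = r + sumCost (x :: xt) := by
      simp [sumCost]; ring
    rw [this]

-- B's loop: the popped-down list, reversed, equals the same maximal fitting prefix
lemma loopB_eq : ∀ (lines : List String) (r budget : Int),
    (shrinkRev lines.reverse (r + sumCost lines) budget).reverse
      = lines.take (fitCount lines r budget) := by
  intro lines
  induction lines using List.reverseRecOn with
  | nil => intro r budget; simp [shrinkRev, fitCount, prefixTotals, sumCost]
  | append_singleton ys z ih =>
    intro r budget
    have hz := lineCost_pos z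
    have hsum : sumCost (ys ++ [z]) = sumCost ys + lineCost z := by
      rw [sumCost_append]; simp [sumCost]
    have hrev : (ys ++ [z]).reverse = z :: ys.reverse := by simp
    rw [hrev, hsum]
    have hcount : fitCount (ys ++ [z]) r budget
        = fitCount ys r budget + (if r + sumCost ys + lineCost z ≤ budget then 1 else 0) := by
      unfold fitCount
      rw [prefixTotals_append]
      simp only [prefixTotals, List.filter_append, List.length_append]
      by_cases h : r + sumCost ys + lineCost z ≤ budget
      · simp [h]
      · simp [h]
    by_cases h : r + (sumCost ys + lineCost z) > budget
    · have step : shrinkRev (z :: ys.reverse) (r + (sumCost ys + lineCost z)) budget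
          = shrinkRev ys.reverse (r + sumCost ys) budget := by
        simp only [shrinkRev, if_pos (show r + (sumCost ys + lineCost z) > budget from h)]
        congr 1
        unfold lineCost
        ring
      rw [step, ih]
      rw [hcount, if_neg (by omega)]
      have hle := fitCount_le_length ys r budget
      simp [List.take_append_of_le_length hle]
    · have step : shrinkRev (z :: ys.reverse) (r + (sumCost ys + lineCost z)) budget
          = z :: ys.reverse := by
        simp only [shrinkRev]
        rw [if_neg h]
      rw [step]
      have hall : fitCount ys r budget = ys.length := by
        unfold fitCount
        have hfs : (prefixTotals ys r).filter (fun t => decide (t ≤ budget))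
            = prefixTotals ys r := by
          rw [List.filter_eq_self]
          intro t ht
          have := prefixTotals_le_last ys r t ht
          simp only [decide_eq_true_eq]
          omega
        rw [hfs, prefixTotals_length]
      rw [hcount, hall, if_pos (by omega)]
      simp

-- ===== VERDICT (by name: the statement is the Claim_ definition above) =====
theorem truncate_section_py_spec : Claim_equal_truncate_section_py := by
  intro section_ max_bytes _
  unfold Spec_truncate_section_py
  simp only [truncate_section_py, truncate_section_py_alt]
  rw [loopA_eq]
  have hB := loopB_eq ((PySem.Str.split? section_ "\n").getD []) 0 (max_bytes - 30)
  rw [zero_add] at hB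
  rw [show (((PySem.Str.split? section_ "\n").getD []).map (fun l => (PySem.Str.len l : Int) + 1)).sum
      = sumCost ((PySem.Str.split? section_ "\n").getD []) from rfl, hB]
  simp
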